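-- pv_equiv track=rewrite | github.com/jhwlds/Multi-Vehicle-Search | algorithm.py | can_fit_vehicles
-- ===== SOURCE A (Python) =====
-- from typing import List, Dict, Tuple, Optional
--
-- def can_fit_vehicles(vehicles: List[Dict], listing_length: int, listing_width: int) -> bool:
--     """Check if vehicles can fit in given space with 2D grid packing
--     All vehicles must face the same direction within a listing"""
--
--     # Expand all vehicle lengths into a flat list
--     lengths: List[int] = []
--     for v in vehicles:
--         for _ in range(v["quantity"]):
--             lengths.append(v["length"])
--
--     if not lengths:
--         return True  # No vehicles, always fits
--
--     # Sort by length descending for better pruning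
--     lengths.sort(reverse=True)
--
--     def can_fit_orientation(L: int, W: int) -> bool:
--         """
--         Check if vehicles can fit when their length goes along L direction
--         with rows of width 10 stacked within W
--         - Number of rows = W // 10
--         - Capacity of each row = L
--         """
--         rows_count = W // 10
--         if rows_count == 0:
--             return False  # Width less than 10, no vehicle can fit
--
--         # Remaining space in each row [L, L, L, ...]
--         rows = [L] * rows_count
--         n = len(lengths)
--
--         # Backtracking: place i-th vehicle into rows
--         def backtrack(i: int) -> bool:
--             if i == n:
--                 return True  # All vehicles placed
--
--             v_len = lengths[i]
--             seen = set()  # Avoid duplicate attempts on rows with same remaining space (pruning)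
--
--             for r in range(rows_count):
--                 if rows[r] >= v_len and rows[r] not in seen:
--                     seen.add(rows[r])
--
--                     rows[r] -= v_len
--                     if backtrack(i + 1):
--                         return True
--                     rows[r] += v_len  # Backtrack
--
--             return False  # Cannot fit in any row
--
--         return backtrack(0)
--
--     # Orientation 1: vehicle length along listing length
--     if can_fit_orientation(listing_length, listing_width):
--         return True
--
--     # Orientation 2: vehicle length along listing width (90 degree rotation)
--     if can_fit_orientation(listing_width, listing_length):
--         return True
--
--     return False
-- ===== SOURCE B (Python) =====
-- def can_fit_vehicles(vehicles, listing_length, listing_width):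
--     """Check if vehicles can fit in given space with 2D grid packing
--     All vehicles must face the same direction within a listing"""
--
--     lengths = []
--     for v in vehicles:
--         q = v["quantity"]
--         if q > 0:
--             lengths.extend([v["length"]] * q)
--
--     if not lengths:
--         return True
--
--     lengths = sorted(lengths, reverse=True)
--
--     def can_fit_orientation(L, W):
--         # rows of width 10 stacked within W; each row has capacity L
--         rows_count = W // 10
--         if rows_count <= 0:
--             return False
--
--         # Recurse over ROWS: fill the current row (remaining capacity c) by
--         # deciding, for each still-unplaced vehicle in order, whether it goes
--         # into the current row or is deferred; when the scan ends, open the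
--         # next row (if any rows are left) for the deferred vehicles.
--         def row(remaining, skipped, c, rows_left):
--             if not remaining:
--                 if not skipped:
--                     return True
--                 return rows_left > 0 and row(skipped, [], L, rows_left - 1)
--             v = remaining[0]
--             rest = remaining[1:]
--             if c >= v and row(rest, skipped, c - v, rows_left):
--                 return True
--             return row(rest, skipped + [v], c, rows_left)
--
--         return row(lengths, [], L, rows_count - 1)
--
--     return (can_fit_orientation(listing_length, listing_width)
--             or can_fit_orientation(listing_width, listing_length))
-- ===== Notes on version B (the rewrite author's own statement) =====
-- stated objective: alternative
-- what changed: The per-item backtracking over an indexed mutable rows array with a seen-set is replaced by a recursion over ROWS: scan the remaining vehicle lengths once per row, deciding for each whether it enters the current row or is deferred, and open the next row from a row budget when the scan ends; the boolean feasibility result is identical.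
import Mathlib
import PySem

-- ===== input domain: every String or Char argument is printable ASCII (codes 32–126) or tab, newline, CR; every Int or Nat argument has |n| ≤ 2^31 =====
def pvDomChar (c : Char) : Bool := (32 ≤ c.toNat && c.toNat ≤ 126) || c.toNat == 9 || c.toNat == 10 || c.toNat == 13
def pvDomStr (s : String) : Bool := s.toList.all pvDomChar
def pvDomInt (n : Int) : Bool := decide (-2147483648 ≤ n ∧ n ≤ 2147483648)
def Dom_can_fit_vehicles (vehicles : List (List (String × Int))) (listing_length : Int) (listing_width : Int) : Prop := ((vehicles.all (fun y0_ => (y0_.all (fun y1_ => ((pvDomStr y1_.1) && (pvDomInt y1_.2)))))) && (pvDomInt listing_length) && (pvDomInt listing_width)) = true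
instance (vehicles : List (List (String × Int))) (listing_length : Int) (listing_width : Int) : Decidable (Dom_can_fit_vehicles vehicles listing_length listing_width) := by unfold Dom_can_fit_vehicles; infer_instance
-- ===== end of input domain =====

-- B replaces A's per-item backtracking over a mutable indexed rows array (with a seen-set) by a
-- recursion over rows that scans the remaining vehicles once per row; same boolean result.

-- ===== PORT A =====
-- lengths expansion: for v in vehicles: for _ in range(v["quantity"]): lengths.append(v["length"])
def pvLenA (vehicles : List (List (String × Int))) : List Int :=
  vehicles.foldl (fun acc v =>
    (PySem.List.pyRange 0 ((PySem.Dict.mk v).getD "quantity" 0) 1).foldl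
      (fun acc2 _ => acc2 ++ [(PySem.Dict.mk v).getD "length" 0]) acc) []

-- the 'for r in range(rows_count)' loop of backtrack; 'next' is the recursive call backtrack(i+1)
def tryA (next : List Int → Bool) (v : Int) (rows : List Int) (r : Nat) (seen : PySem.Set Int) : Bool :=
  if h : r < rows.length then
    if decide (v ≤ rows[r]) && !(PySem.Set.contains seen rows[r]) then
      if next (rows.set r (rows[r] - v)) then true
      else tryA next v rows (r + 1) (PySem.Set.add seen rows[r])
    else tryA next v rows (r + 1) seen
  else false
termination_by rows.length - r

-- backtrack(i), with the suffix lengths[i:] as the list argument and rows the mutable row state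
def btA : List Int → List Int → Bool
  | [], _ => true
  | v :: ls, rows => tryA (btA ls) v rows 0 PySem.Set.empty

def orientA (lengths : List Int) (L : Int) (W : Int) : Bool :=
  let rows_count := PySem.Int.floordiv W 10
  if rows_count = 0 then false
  else btA lengths (List.replicate rows_count.toNat L)

def can_fit_vehicles (vehicles : List (List (String × Int))) (listing_length : Int) (listing_width : Int) : Bool :=
  let lengths := pvLenA vehicles
  if lengths = [] then true
  else
    let lengths := PySem.List.sorted lengths (fun x => x) true
    if orientA lengths listing_length listing_width then true
    else if orientA lengths listing_width listing_length then true
    else false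

-- ===== PORT B =====
def pvLenB (vehicles : List (List (String × Int))) : List Int :=
  vehicles.foldl (fun acc v =>
    let q := (PySem.Dict.mk v).getD "quantity" 0
    if 0 < q then acc ++ List.replicate q.toNat ((PySem.Dict.mk v).getD "length" 0)
    else acc) []

-- row(remaining, skipped, c, rows_left): fill the current row, deferring skipped vehicles
def rowB (L : Int) : List Int → List Int → Int → Int → Bool
  | [], skipped, _, rows_left =>
      if skipped = [] then true
      else if 0 < rows_left then rowB L skipped [] L (rows_left - 1) else false
  | v :: rest, skipped, c, rows_left =>
      if decide (v ≤ c) && rowB L rest skipped (c - v) rows_left then true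
      else rowB L rest (skipped ++ [v]) c rows_left
termination_by rem _ _ rows_left => (rows_left.toNat, rem.length)

def orientB (lengths : List Int) (L : Int) (W : Int) : Bool :=
  let k := PySem.Int.floordiv W 10
  if k ≤ 0 then false else rowB L lengths [] L (k - 1)

def can_fit_vehicles_alt (vehicles : List (List (String × Int))) (listing_length : Int) (listing_width : Int) : Bool :=
  let lengths := pvLenB vehicles
  if lengths = [] then true
  else
    let lengths := PySem.List.sorted lengths (fun x => x) true
    orientB lengths listing_length listing_width || orientB lengths listing_width listing_length

-- ===== PRECONDITION & SPEC =====
-- A raises KeyError when a vehicle dict lacks "quantity", or lacks "length" with a positive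
-- quantity (the "length" key is only read inside the range(quantity) loop); Pre_ excludes exactly those.
def Pre_can_fit_vehicles (vehicles : List (List (String × Int))) (listing_length : Int) (listing_width : Int) : Prop :=
  ∀ v ∈ vehicles, ((PySem.Dict.mk v).get? "quantity").isSome = true ∧
    (0 < (PySem.Dict.mk v).getD "quantity" 0 → ((PySem.Dict.mk v).get? "length").isSome = true)
instance (vehicles : List (List (String × Int))) (listing_length : Int) (listing_width : Int) : Decidable (Pre_can_fit_vehicles vehicles listing_length listing_width) := by unfold Pre_can_fit_vehicles; infer_instance

def pvWitness_can_fit_vehicles : (List (List (String × Int))) × Int × Int :=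
  ([[("quantity", 2), ("length", 5)], [("quantity", 1), ("length", 8)]], 20, 10)

def Spec_can_fit_vehicles (vehicles : List (List (String × Int))) (listing_length : Int) (listing_width : Int) (out : Bool) : Prop := out = can_fit_vehicles_alt vehicles listing_length listing_width
instance (vehicles : List (List (String × Int))) (listing_length : Int) (listing_width : Int) (out : Bool) : Decidable (Spec_can_fit_vehicles vehicles listing_length listing_width out) := by unfold Spec_can_fit_vehicles; infer_instance

-- ===== CLAIM (what is proved, stated in full; the proofs are below) =====
def Claim_equal_can_fit_vehicles : Prop := ∀ (vehicles : List (List (String × Int))) (listing_length : Int) (listing_width : Int), Dom_can_fit_vehicles vehicles listing_length listing_width → Pre_can_fit_vehicles vehicles listing_length listing_width → Spec_can_fit_vehicles vehicles listing_length listing_width (can_fit_vehicles vehicles listing_length listing_width)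

-- ===== LEMMAS AND PROOFS =====

-- prefix feasibility of one row: the items, in order, fit into remaining capacity c
def rowOK : Int → List Int → Bool
  | _, [] => true
  | c, v :: vs => decide (v ≤ c) && rowOK (c - v) vs

-- ls is an order-preserving interleaving of S and T
inductive Ilv : List Int → List Int → List Int → Prop
  | nil : Ilv [] [] []
  | left {v S T ls} : Ilv S T ls → Ilv (v :: S) T (v :: ls)
  | right {v S T ls} : Ilv S T ls → Ilv S (v :: T) (v :: ls)

-- ls can be split, order-preservingly, into one feasible row per capacity in caps
inductive PP : List Int → List Int → Prop
  | nil : PP [] []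
  | cons {c caps S T ls} : Ilv S T ls → rowOK c S = true → PP caps T → PP (c :: caps) ls

-- item-sequential packing into a multiset of remaining capacities
inductive Pk : List Int → Multiset Int → Prop
  | nil (M) : Pk [] M
  | cons {v ls M c} : c ∈ M → v ≤ c → Pk ls ((c - v) ::ₘ M.erase c) → Pk (v :: ls) M

theorem Ilv_nil (S T : List Int) (h : Ilv S T []) : S = [] ∧ T = [] := by
  cases h; exact ⟨rfl, rfl⟩

theorem PP_nil_right (caps : List Int) : PP caps [] := by
  induction caps with
  | nil => exact .nil
  | cons c caps ih => exact .cons .nil rfl ih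

theorem Ilv_exchange {S₁ T₁ ls S₂ T₂ : List Int} (h₁ : Ilv S₁ T₁ ls) (h₂ : Ilv S₂ T₂ T₁) :
    ∃ U, Ilv S₂ U ls ∧ Ilv S₁ T₂ U := by
  induction h₁ generalizing S₂ T₂ with
  | nil => cases h₂; exact ⟨[], .nil, .nil⟩
  | left h ih =>
      obtain ⟨U, hU1, hU2⟩ := ih h₂
      exact ⟨_ :: U, .right hU1, .left hU2⟩
  | @right v S T ls h ih =>
      cases h₂ with
      | left h₂' =>
          obtain ⟨U, hU1, hU2⟩ := ih h₂'
          exact ⟨U, .left hU1, hU2⟩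
      | right h₂' =>
          obtain ⟨U, hU1, hU2⟩ := ih h₂'
          exact ⟨v :: U, .right hU1, .right hU2⟩

theorem PP_perm {caps caps' ls : List Int} (hp : caps.Perm caps') (h : PP caps ls) : PP caps' ls := by
  induction hp generalizing ls with
  | nil => exact h
  | cons c _ ih => cases h with | cons hI hR hPP => exact .cons hI hR (ih hPP)
  | swap a b caps =>
      cases h with
      | cons hI1 hR1 hPP =>
        cases hPP with
        | cons hI2 hR2 hPP2 =>
          obtain ⟨U, hU1, hU2⟩ := Ilv_exchange hI1 hI2
          exact .cons hU1 hR2 (.cons hU2 hR1 hPP2)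
  | trans _ _ ih1 ih2 => exact ih2 (ih1 h)

theorem Pk_merge {S T ls : List Int} {c : Int} {M : Multiset Int}
    (hI : Ilv S T ls) (hR : rowOK c S = true) (hP : Pk T M) : Pk ls (c ::ₘ M) := by
  induction hI generalizing c M with
  | nil => exact .nil _
  | @left v S T ls h ih =>
      simp only [rowOK, Bool.and_eq_true, decide_eq_true_eq] at hR
      refine .cons (Multiset.mem_cons_self c M) hR.1 ?_
      rw [Multiset.erase_cons_head]
      exact ih hR.2 hP
  | @right v S T ls h ih =>
      cases hP with
      | @cons _ _ _ d hd hvd hP' =>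
          refine .cons (Multiset.mem_cons_of_mem hd) hvd ?_
          have he : (c ::ₘ M).erase d = c ::ₘ M.erase d := by
            by_cases hcd : c = d
            · subst hcd
              rw [Multiset.erase_cons_head]
              exact (Multiset.cons_erase hd).symm
            · exact Multiset.erase_cons_tail _ hcd
          rw [he, Multiset.cons_swap]
          exact ih hR (hP')

theorem Pk_split {ls : List Int} : ∀ {caps : List Int}, Pk ls (↑caps) → PP caps ls := by
  induction ls with
  | nil => intro caps _; exact PP_nil_right caps
  | cons v ls ih =>
      intro caps h
      cases h with
      | @cons _ _ _ c hc hvc hP =>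
          have hcl : c ∈ caps := by exact_mod_cast hc
          have hcoe : ((c - v) ::ₘ (↑caps : Multiset Int).erase c) = ((((c - v) :: caps.erase c) : List Int) : Multiset Int) := by
            simp [Multiset.coe_erase]
          rw [hcoe] at hP
          have hPP := ih hP
          cases hPP with
          | cons hI hR hPP2 =>
              have : PP (c :: caps.erase c) (v :: ls) :=
                .cons (.left hI) (by simp only [rowOK, Bool.and_eq_true, decide_eq_true_eq]; exact ⟨hvc, hR⟩) hPP2
              exact PP_perm (List.perm_cons_erase hcl).symm this

theorem Pk_of_PP {caps ls : List Int} (h : PP caps ls) : Pk ls (↑caps) := by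
  induction h with
  | nil => exact .nil _
  | cons hI hR _ ih => exact Pk_merge hI hR ih

theorem Pk_iff_PP {caps ls : List Int} : Pk ls (↑caps) ↔ PP caps ls :=
  ⟨Pk_split, Pk_of_PP⟩

-- multiset view of in-place row update: rows.set j x has multiset x + (rows minus rows[j])
theorem set_perm {rows : List Int} {j : Nat} (h : j < rows.length) (x : Int) :
    (rows.set j x).Perm (x :: rows.eraseIdx j) := by
  induction rows generalizing j with
  | nil => simp at h
  | cons a rows ih =>
      cases j with
      | zero => simp
      | succ j =>
          simp only [List.set_cons_succ, List.eraseIdx_cons_succ]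
          exact (List.Perm.cons a (ih (by simpa using h))).trans (List.Perm.swap x a _)

theorem coe_set_eq {rows : List Int} {j : Nat} (h : j < rows.length) (x : Int) :
    ((rows.set j x : List Int) : Multiset Int) = x ::ₘ ((rows : Multiset Int).erase rows[j]) := by
  have h1 : ((rows.set j x : List Int) : Multiset Int) = (x :: rows.eraseIdx j : List Int) :=
    Quot.sound (set_perm h x)
  have h2 : ((rows : List Int) : Multiset Int) = (rows[j] :: rows.eraseIdx j : List Int) := by
    have := set_perm h (rows[j])
    rw [List.set_getElem_self] at this
    exact Quot.sound this
  rw [h1, h2]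
  simp

theorem tryA_sound {next : List Int → Bool} {v : Int} {rows : List Int} :
    ∀ {r : Nat} {seen : PySem.Set Int}, tryA next v rows r seen = true →
    ∃ j, ∃ (h : j < rows.length), r ≤ j ∧ v ≤ rows[j] ∧ next (rows.set j (rows[j] - v)) = true := by
  intro r
  induction hn : rows.length - r using Nat.strong_induction_on generalizing r with
  | _ n ih =>
    intro seen htr
    rw [tryA] at htr
    by_cases h : r < rows.length
    · rw [dif_pos h] at htr
      by_cases hcond : (decide (v ≤ rows[r]) && !(PySem.Set.contains seen rows[r])) = true
      · rw [if_pos hcond] at htr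
        by_cases hb : next (rows.set r (rows[r] - v)) = true
        · refine ⟨r, h, le_refl r, ?_, hb⟩
          simp only [Bool.and_eq_true, decide_eq_true_eq] at hcond
          exact hcond.1
        · rw [if_neg hb] at htr
          obtain ⟨j, hj, hrj, rest⟩ := ih (rows.length - (r + 1)) (by omega) rfl htr
          exact ⟨j, hj, by omega, rest⟩
      · rw [if_neg hcond] at htr
        obtain ⟨j, hj, hrj, rest⟩ := ih (rows.length - (r + 1)) (by omega) rfl htr
        exact ⟨j, hj, by omega, rest⟩
    · rw [dif_neg h] at htr
      exact Bool.noConfusion htr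

theorem tryA_complete {next : List Int → Bool} {ls : List Int} {v : Int} {rows : List Int} {c : Int}
    (hnext : ∀ rows' : List Int, Pk ls (↑rows') → next rows' = true)
    (hP : Pk ls ((c - v) ::ₘ ((rows : Multiset Int).erase c))) (hvc : v ≤ c) :
    ∀ {r : Nat} {seen : PySem.Set Int}, (∃ j, ∃ (h : j < rows.length), r ≤ j ∧ rows[j] = c) →
    PySem.Set.contains seen c = false → tryA next v rows r seen = true := by
  intro r
  induction hn : rows.length - r using Nat.strong_induction_on generalizing r with
  | _ n ih =>
    intro seen hex hseen
    obtain ⟨j, hj, hrj, hjc⟩ := hex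
    have hr : r < rows.length := by omega
    rw [tryA, dif_pos hr]
    by_cases hcond : (decide (v ≤ rows[r]) && !(PySem.Set.contains seen rows[r])) = true
    · rw [if_pos hcond]
      by_cases hrc : rows[r] = c
      · have hnx : next (rows.set r (rows[r] - v)) = true := by
          apply hnext
          rw [coe_set_eq hr, hrc]
          exact hP
        rw [if_pos hnx]
      · by_cases hb : next (rows.set r (rows[r] - v)) = true
        · rw [if_pos hb]
        · rw [if_neg hb]
          apply ih (rows.length - (r + 1)) (by omega) rfl
          · refine ⟨j, hj, ?_, hjc⟩
            rcases Nat.lt_or_ge r j with h' | h'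
            · omega
            · exfalso
              have : r = j := by omega
              subst this
              exact hrc hjc
          · have hne : rows[r] ≠ c := hrc
            unfold PySem.Set.add
            split
            · exact hseen
            · rw [← Bool.not_eq_true, PySem.Set.contains_iff]
              intro hmem
              rcases List.mem_append.mp hmem with h1 | h1
              · rw [← PySem.Set.contains_iff] at h1
                rw [h1] at hseen
                exact Bool.noConfusion hseen
              · simp only [List.mem_singleton] at h1
                exact hne h1.symm
    · rw [if_neg hcond]
      apply ih (rows.length - (r + 1)) (by omega) rfl
      · refine ⟨j, hj, ?_, hjc⟩
        rcases Nat.lt_or_ge r j with h' | h'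
        · omega
        · exfalso
          have : r = j := by omega
          subst this
          rw [hjc] at hcond
          exact hcond (by rw [hseen]; simp [hvc])
      · exact hseen

theorem btA_iff : ∀ (ls rows : List Int), btA ls rows = true ↔ Pk ls (↑rows) := by
  intro ls
  induction ls with
  | nil => intro rows; simp only [btA]; exact ⟨fun _ => .nil _, fun _ => trivial⟩
  | cons v ls ih =>
      intro rows
      constructor
      · intro h
        rw [btA] at h
        obtain ⟨j, hj, _, hvj, hnext⟩ := tryA_sound h
        exact .cons (by exact_mod_cast List.getElem_mem hj) hvj
          (by rw [← coe_set_eq hj]; exact (ih _).mp hnext)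
      · intro h
        cases h with
        | @cons _ _ _ c hc hvc hP =>
            rw [btA]
            have hcl : c ∈ rows := by exact_mod_cast hc
            obtain ⟨j, hj, hjc⟩ := List.getElem_of_mem hcl
            exact tryA_complete (fun rows' hp => (ih rows').mpr hp) hP hvc
              ⟨j, hj, Nat.zero_le j, hjc⟩ (by simp [PySem.Set.empty, PySem.Set.contains])

theorem Ilv_cons {S T ls : List Int} {v : Int} (h : Ilv S T (v :: ls)) :
    (∃ S', S = v :: S' ∧ Ilv S' T ls) ∨ (∃ T', T = v :: T' ∧ Ilv S T' ls) := by
  cases h with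
  | left h' => exact .inl ⟨_, rfl, h'⟩
  | right h' => exact .inr ⟨_, rfl, h'⟩

theorem PP_cons_iff {c : Int} {caps ls : List Int} :
    PP (c :: caps) ls ↔ ∃ S T, Ilv S T ls ∧ rowOK c S = true ∧ PP caps T := by
  constructor
  · intro h; cases h with | cons hI hR hPP => exact ⟨_, _, hI, hR, hPP⟩
  · rintro ⟨S, T, hI, hR, hPP⟩; exact .cons hI hR hPP

theorem rowB_iff (L : Int) : ∀ (rem sk : List Int) (c k : Int),
    rowB L rem sk c k = true ↔
    ∃ S T, Ilv S T rem ∧ rowOK c S = true ∧ PP (List.replicate k.toNat L) (sk ++ T) := by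
  intro rem sk c k
  induction rem, sk, c, k using rowB.induct L with
  | case1 c k =>
      rw [rowB, if_pos rfl]
      exact ⟨fun _ => ⟨[], [], .nil, rfl, by simpa using PP_nil_right _⟩, fun _ => rfl⟩
  | case2 sk c k hsk hk ih =>
      rw [rowB, if_neg hsk, if_pos hk, ih]
      have hrep : List.replicate k.toNat L = L :: List.replicate (k - 1).toNat L := by
        have hk' : k.toNat = (k - 1).toNat + 1 := by omega
        rw [hk', List.replicate_succ]
      constructor
      · rintro ⟨S, T, hI, hR, hPP⟩
        refine ⟨[], [], .nil, rfl, ?_⟩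
        simp only [List.append_nil]
        rw [hrep]
        simp only [List.nil_append] at hPP
        exact .cons hI hR hPP
      · rintro ⟨S, T, hI, hR, hPP⟩
        obtain ⟨hS, hT⟩ := Ilv_nil _ _ hI
        subst hT
        simp only [List.append_nil] at hPP
        rw [hrep] at hPP
        rcases PP_cons_iff.mp hPP with ⟨S', T', hI', hR', hPP'⟩
        exact ⟨S', T', hI', hR', by simpa using hPP'⟩
  | case3 sk c k hsk hk =>
      rw [rowB]
      rw [if_neg hsk, if_neg hk]
      constructor
      · intro h; exact absurd h (by simp)
      · rintro ⟨S, T, hI, hR, hPP⟩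
        obtain ⟨hS, hT⟩ := Ilv_nil _ _ hI
        subst hT
        have hk0 : k.toNat = 0 := by omega
        rw [hk0] at hPP
        simp only [List.replicate_zero, List.append_nil] at hPP
        cases hPP
        exact absurd rfl hsk
  | case4 v rest sk c k h ih =>
      rw [rowB]
      rw [if_pos h]
      constructor
      · intro _
        have h1 : decide (v ≤ c) = true := by
          cases hd : decide (v ≤ c)
          · rw [hd] at h; exact Bool.noConfusion h
          · rfl
        have h2 : rowB L rest sk (c - v) k = true := by
          rw [h1] at h; simpa using h
        obtain ⟨S, T, hI, hR, hPP⟩ := ih.mp h2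
        refine ⟨v :: S, T, .left hI, ?_, hPP⟩
        simp only [rowOK, Bool.and_eq_true]
        exact ⟨h1, hR⟩
      · intro _; rfl
  | case5 v rest sk c k h ih1 ih2 =>
      rw [rowB]
      rw [if_neg h]
      rw [ih2]
      constructor
      · rintro ⟨S, T, hI, hR, hPP⟩
        refine ⟨S, v :: T, .right hI, hR, ?_⟩
        simpa using hPP
      · rintro ⟨S, T, hI, hR, hPP⟩
        rcases Ilv_cons hI with ⟨S', hS, hI'⟩ | ⟨T', hT, hI'⟩
        · exfalso
          subst hS
          simp only [rowOK, Bool.and_eq_true, decide_eq_true_eq] at hR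
          have hrb : rowB L rest sk (c - v) k = true := ih1.mpr ⟨S', T, hI', hR.2, hPP⟩
          apply h
          simp [hR.1, hrb]
        · subst hT
          exact ⟨S, T', hI', hR, by simpa using hPP⟩

theorem orient_eq (lengths : List Int) (hne : lengths ≠ []) (L W : Int) :
    orientA lengths L W = orientB lengths L W := by
  unfold orientA orientB
  set k := PySem.Int.floordiv W 10 with hk
  by_cases h0 : k = 0
  · rw [if_pos h0, if_pos (by omega : k ≤ 0)]
  · rw [if_neg h0]
    by_cases hneg : k ≤ 0
    · rw [if_pos hneg]
      have hk0 : k.toNat = 0 := by omega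
      rw [hk0]
      simp only [List.replicate_zero]
      obtain ⟨v, ls, rfl⟩ := List.exists_cons_of_ne_nil hne
      rw [btA, tryA]
      simp
    · rw [if_neg hneg]
      have hAiff := btA_iff lengths (List.replicate k.toNat L)
      have hBiff := rowB_iff L lengths [] L (k - 1)
      have hrep : List.replicate k.toNat L = L :: List.replicate (k - 1).toNat L := by
        have : k.toNat = (k - 1).toNat + 1 := by omega
        rw [this, List.replicate_succ]
      have hiff : Pk lengths (↑(List.replicate k.toNat L)) ↔
          (∃ S T, Ilv S T lengths ∧ rowOK L S = true ∧ PP (List.replicate (k - 1).toNat L) ([] ++ T)) := by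
        rw [Pk_iff_PP, hrep, PP_cons_iff]
        simp
      rw [hiff] at hAiff
      rw [← hBiff] at hAiff
      cases hA : btA lengths (List.replicate k.toNat L) <;>
        cases hB : rowB L lengths [] L (k - 1) <;> simp_all

theorem foldl_const_append (x : Int) : ∀ (l : List Int) (acc : List Int),
    l.foldl (fun a (_ : Int) => a ++ [x]) acc = acc ++ List.replicate l.length x := by
  intro l
  induction l with
  | nil => simp
  | cons y l ih => intro acc; simp [ih, List.replicate_succ, List.append_assoc]

theorem lengths_eq (vehicles : List (List (String × Int))) : pvLenA vehicles = pvLenB vehicles := by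
  unfold pvLenA pvLenB
  suffices h : ∀ acc, vehicles.foldl (fun acc v =>
      (PySem.List.pyRange 0 ((PySem.Dict.mk v).getD "quantity" 0) 1).foldl
        (fun acc2 _ => acc2 ++ [(PySem.Dict.mk v).getD "length" 0]) acc) acc =
      vehicles.foldl (fun acc v =>
        let q := (PySem.Dict.mk v).getD "quantity" 0
        if 0 < q then acc ++ List.replicate q.toNat ((PySem.Dict.mk v).getD "length" 0)
        else acc) acc by
    exact h []
  induction vehicles with
  | nil => intro acc; rfl
  | cons v vehicles ih =>
      intro acc
      simp only [List.foldl_cons]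
      rw [ih]
      congr 1
      rw [foldl_const_append]
      rw [PySem.List.length_pyRange_one]
      by_cases hq : 0 < (PySem.Dict.mk v).getD "quantity" 0
      · rw [if_pos hq, sub_zero]
      · rw [if_neg hq]
        have h0 : ((PySem.Dict.mk v).getD "quantity" 0 - 0).toNat = 0 := by omega
        rw [h0, List.replicate_zero, List.append_nil]

-- ===== VERDICT (by name: the statement is the Claim_ definition above) =====
theorem can_fit_vehicles_spec : Claim_equal_can_fit_vehicles := by
  intro vehicles listing_length listing_width _ _
  unfold Spec_can_fit_vehicles can_fit_vehicles can_fit_vehicles_alt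
  rw [← lengths_eq]
  by_cases hnil : pvLenA vehicles = []
  · simp [hnil]
  · simp only [hnil, if_false]
    have hsne : PySem.List.sorted (pvLenA vehicles) (fun x => x) true ≠ [] := by
      intro h
      rw [PySem.List.sorted_eq_nil_iff] at h
      exact hnil h
    rw [orient_eq _ hsne, orient_eq _ hsne]
    cases orientB (PySem.List.sorted (pvLenA vehicles) (fun x => x) true) listing_length listing_width <;>
      cases orientB (PySem.List.sorted (pvLenA vehicles) (fun x => x) true) listing_width listing_length <;> simp
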